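-- pv_equiv track=rewrite | github.com/platformcontext/platform-context-graph | src/platform_context_graph/data_intelligence/dbt_sql_expressions.py | _split_cast_arguments
-- ===== SOURCE A (Python) =====
-- def _split_cast_arguments(arguments: str) -> tuple[str | None, str | None]:
--     """Split one CAST body into value and type expressions."""
--
--     depth = 0
--     in_single_quote = False
--     lower_arguments = arguments.lower()
--
--     for index, character in enumerate(arguments):
--         if character == "'" and (index == 0 or arguments[index - 1] != "\\"):
--             in_single_quote = not in_single_quote
--             continue
--         if in_single_quote:
--             continue
--         if character == "(":
--             depth += 1
--             continue
--         if character == ")" and depth > 0: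
--             depth -= 1
--             continue
--         if depth != 0:
--             continue
--         if lower_arguments[index : index + 4] != " as ":
--             continue
--         value_expression = arguments[:index].strip()
--         type_expression = arguments[index + 4 :].strip()
--         return value_expression, type_expression
--     return None, None
-- ===== SOURCE B (Python) =====
-- def _prefix_state(prefix):
--     """Quote/paren state after scanning prefix left-to-right (A's rules)."""
--     in_single_quote = False
--     depth = 0
--     prev = None
--     for character in prefix:
--         if character == "'" and prev != "\\":
--             in_single_quote = not in_single_quote
--         elif not in_single_quote:
--             if character == "(":
--                 depth += 1
--             elif character == ")" and depth > 0:
--                 depth -= 1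
--         prev = character
--     return in_single_quote, depth
--
--
-- def _split_cast_arguments(arguments):
--     """Split one CAST body into value and type expressions."""
--     lower_arguments = arguments.lower()
--     start = 0
--     while True:
--         index = lower_arguments.find(" as ", start)
--         if index == -1:
--             return None, None
--         in_single_quote, depth = _prefix_state(arguments[:index])
--         if not in_single_quote and depth == 0:
--             return arguments[:index].strip(), arguments[index + 4:].strip()
--         start = index + 1
-- ===== Notes on version B (the rewrite author's own statement) =====
-- stated objective: faster
-- what changed: Replaces A's single character-by-character state machine (one fused scan that tracks quote/paren state and tests every index for the separator) with a find-then-validate decomposition: str.find enumerates the next candidate separator position and a separate helper pass recomputes the quote/paren state of the prefix to accept or reject it.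
import Mathlib
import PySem

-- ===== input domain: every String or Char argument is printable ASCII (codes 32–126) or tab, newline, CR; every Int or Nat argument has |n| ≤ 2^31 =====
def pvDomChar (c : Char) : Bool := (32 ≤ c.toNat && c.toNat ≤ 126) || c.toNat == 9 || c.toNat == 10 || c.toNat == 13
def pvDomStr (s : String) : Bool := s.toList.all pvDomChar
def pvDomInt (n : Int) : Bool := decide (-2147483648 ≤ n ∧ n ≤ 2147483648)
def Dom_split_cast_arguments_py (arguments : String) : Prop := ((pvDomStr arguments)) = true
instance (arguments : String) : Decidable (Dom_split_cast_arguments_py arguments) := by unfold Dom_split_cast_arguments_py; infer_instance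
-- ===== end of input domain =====

-- B replaces A's single character-by-character state machine with a find-then-validate
-- decomposition: str.find enumerates the next candidate separator and a separate helper pass
-- recomputes the quote/paren state of the prefix (objective: faster, measured).

-- ===== PORT A =====
-- " as " as a list of chars
def pvPatA : List Char := [' ', 'a', 's', ' ']

-- the enumerate loop of A: rest is the not-yet-visited suffix of cs, i the current index,
-- depth/inq the loop state.  slices arguments[:i], lower[i:i+4], arguments[i+4:]
-- with nonneg bounds are take/drop (exact).
def pvALoop (cs lcs rest : List Char) (i : Nat) (depth : Int) (inq : Bool) :
    Option String × Option String :=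
  match rest with
  | [] => (none, none)
  | c :: rs =>
    if c = '\'' ∧ (i = 0 ∨ cs.getD (i - 1) ' ' ≠ '\\') then
      pvALoop cs lcs rs (i + 1) depth (!inq)
    else if inq then pvALoop cs lcs rs (i + 1) depth inq
    else if c = '(' then pvALoop cs lcs rs (i + 1) (depth + 1) inq
    else if c = ')' ∧ depth > 0 then pvALoop cs lcs rs (i + 1) (depth - 1) inq
    else if depth ≠ 0 then pvALoop cs lcs rs (i + 1) depth inq
    else if (lcs.drop i).take 4 ≠ pvPatA then pvALoop cs lcs rs (i + 1) depth inq
    else (some (String.ofList (PySem.Chars.strip (cs.take i))),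
          some (String.ofList (PySem.Chars.strip (cs.drop (i + 4)))))

def split_cast_arguments_py (arguments : String) : Option String × Option String :=
  pvALoop arguments.toList (PySem.Chars.lower arguments.toList) arguments.toList 0 0 false

-- ===== PORT B =====
def pvPatB : List Char := [' ', 'a', 's', ' ']

-- B's helper _prefix_state: scan prefix carrying prev char, quote flag and depth.
def pvPrefixState (prev : Option Char) (l : List Char) (inq : Bool) (depth : Int) : Bool × Int :=
  match l with
  | [] => (inq, depth)
  | c :: rest =>
    if c = '\'' ∧ prev ≠ some '\\' then pvPrefixState (some c) rest (!inq) depth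
    else if inq = false ∧ c = '(' then pvPrefixState (some c) rest inq (depth + 1)
    else if inq = false ∧ c = ')' ∧ depth > 0 then pvPrefixState (some c) rest inq (depth - 1)
    else pvPrefixState (some c) rest inq depth

-- B's while loop: find the next " as " candidate, validate the prefix state, else advance.
-- fuel is a totality guard only: the loop always ends within length + 1 find calls.
def pvBLoop (cs lcs : List Char) (fuel : Nat) (start : Nat) : Option String × Option String :=
  match fuel with
  | 0 => (none, none)
  | fuel + 1 =>
    if PySem.Chars.findFrom lcs pvPatB (start : Int) none = -1 then (none, none)
    else
      let i := (PySem.Chars.findFrom lcs pvPatB (start : Int) none).toNat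
      let st := pvPrefixState none (cs.take i) false 0
      if st.1 = false ∧ st.2 = 0 then
        (some (String.ofList (PySem.Chars.strip (cs.take i))),
         some (String.ofList (PySem.Chars.strip (cs.drop (i + 4)))))
      else pvBLoop cs lcs fuel (i + 1)

def split_cast_arguments_py_alt (arguments : String) : Option String × Option String :=
  pvBLoop arguments.toList (PySem.Chars.lower arguments.toList)
    ((PySem.Chars.lower arguments.toList).length + 1) 0

-- ===== PRECONDITION & SPEC =====
def Spec_split_cast_arguments_py (arguments : String) (out : Option String × Option String) : Prop := out = split_cast_arguments_py_alt arguments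
instance (arguments : String) (out : Option String × Option String) : Decidable (Spec_split_cast_arguments_py arguments out) := by unfold Spec_split_cast_arguments_py; infer_instance

-- ===== CLAIM (what is proved, stated in full; the proofs are below) =====
def Claim_equal_split_cast_arguments_py : Prop := ∀ (arguments : String), Dom_split_cast_arguments_py arguments → Spec_split_cast_arguments_py arguments (split_cast_arguments_py arguments)

-- ===== LEMMAS AND PROOFS =====

-- a found index means the search started inside the string
lemma pvFindFrom_start_le (lcs sub : List Char) (start : Nat)
    (h : PySem.Chars.findFrom lcs sub (start : Int) none ≠ -1) : start ≤ lcs.length := by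
  by_contra hgt
  apply h
  simp only [PySem.Chars.findFrom]
  have : (lcs.length : Int) < (start : Int) := by omega
  simp only [if_neg (by omega : ¬ (start : Int) < 0), if_pos this]


-- quote/paren state of B's helper after the first i characters
def pvStateAt (cs : List Char) (i : Nat) : Bool × Int := pvPrefixState none (cs.take i) false 0

-- the common specification: first index i with " as " at i (in the lowered string)
-- and clean state before i; rendered as the split result.
def pvFG (cs : List Char) (i : Nat) : Option Nat :=
  if i < cs.length then
    if ((PySem.Chars.lower cs).drop i).take 4 = pvPatA ∧ pvStateAt cs i = (false, 0) then some i
    else pvFG cs (i + 1)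
  else none
termination_by cs.length - i

def pvRender (cs : List Char) (r : Option Nat) : Option String × Option String :=
  match r with
  | none => (none, none)
  | some i => (some (String.ofList (PySem.Chars.strip (cs.take i))),
               some (String.ofList (PySem.Chars.strip (cs.drop (i + 4)))))

lemma pvFG_stop (cs : List Char) (i : Nat) (h : ¬ i < cs.length) : pvFG cs i = none := by
  rw [pvFG, if_neg h]

lemma pvFG_cont (cs : List Char) (i : Nat) (h : i < cs.length)
    (hnq : ¬ (((PySem.Chars.lower cs).drop i).take 4 = pvPatA ∧ pvStateAt cs i = (false, 0))) :
    pvFG cs i = pvFG cs (i + 1) := by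
  rw [pvFG, if_pos h, if_neg hnq]

lemma pvFG_found (cs : List Char) (i : Nat) (h : i < cs.length)
    (hq : ((PySem.Chars.lower cs).drop i).take 4 = pvPatA ∧ pvStateAt cs i = (false, 0)) :
    pvFG cs i = some i := by
  rw [pvFG, if_pos h, if_pos hq]

lemma pvGetLast?_cons_or (c : Char) (t : List Char) (prev : Option Char) :
    ((c :: t).getLast?).or prev = (t.getLast?).or (some c) := by
  cases t with
  | nil => rfl
  | cons x xs =>
    rw [List.getLast?_cons_cons]
    cases h : (x :: xs).getLast? with
    | none => rw [List.getLast?_eq_none_iff] at h; exact absurd h (by simp)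
    | some y => rfl

lemma pvPrefixState_append (l₁ : List Char) : ∀ (prev : Option Char) (l₂ : List Char) (q : Bool) (d : Int),
    pvPrefixState prev (l₁ ++ l₂) q d =
      pvPrefixState ((l₁.getLast?).or prev) l₂ (pvPrefixState prev l₁ q d).1 (pvPrefixState prev l₁ q d).2 := by
  induction l₁ with
  | nil => intro prev l₂ q d; simp [pvPrefixState]
  | cons c t ih =>
    intro prev l₂ q d
    rw [List.cons_append]
    simp only [pvPrefixState]
    rw [pvGetLast?_cons_or]
    split_ifs <;> exact ih (some c) l₂ _ _

lemma pvTake_getLast? (cs : List Char) (i : Nat) (h : i < cs.length) :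
    ((cs.take i).getLast?).or none = if i = 0 then none else some (cs.getD (i - 1) ' ') := by
  cases i with
  | zero => simp
  | succ n =>
    rw [if_neg (Nat.succ_ne_zero n), Option.or_none]
    rw [List.getLast?_eq_getElem?]
    have hlen : (cs.take (n + 1)).length = n + 1 := by rw [List.length_take]; omega
    rw [hlen]
    simp only [Nat.add_sub_cancel]
    rw [List.getElem?_take, if_pos (by omega)]
    rw [List.getElem?_eq_getElem (by omega : n < cs.length)]
    simp [List.getD, List.getElem?_eq_getElem (by omega : n < cs.length)]

lemma pvQuoteCond (cs : List Char) (i : Nat) (c : Char) :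
    (c = '\'' ∧ (i = 0 ∨ cs.getD (i - 1) ' ' ≠ '\\')) ↔
      (c = '\'' ∧ (if i = 0 then none else some (cs.getD (i - 1) ' ')) ≠ some '\\') := by
  by_cases h0 : i = 0 <;> simp [h0]

lemma pvStateAt_succ (cs : List Char) (i : Nat) (h : i < cs.length) (q : Bool) (d : Int)
    (hs : pvStateAt cs i = (q, d)) :
    pvStateAt cs (i + 1) =
      (if cs.getD i ' ' = '\'' ∧ (i = 0 ∨ cs.getD (i - 1) ' ' ≠ '\\') then (!q, d)
       else if q = false ∧ cs.getD i ' ' = '(' then (q, d + 1)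
       else if q = false ∧ cs.getD i ' ' = ')' ∧ d > 0 then (q, d - 1)
       else (q, d)) := by
  have htake : cs.take (i + 1) = cs.take i ++ [cs.getD i ' '] := by
    rw [List.take_add_one]
    congr 1
    rw [List.getElem?_eq_getElem h]
    simp [List.getD, List.getElem?_eq_getElem h]
  unfold pvStateAt at hs ⊢
  rw [htake, pvPrefixState_append, pvTake_getLast? cs i h, hs]
  rw [if_congr (pvQuoteCond cs i (cs.getD i ' ')) rfl rfl]
  simp only [pvPrefixState]

lemma pvLower_length (cs : List Char) : (PySem.Chars.lower cs).length = cs.length := by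
  simp [PySem.Chars.lower]

lemma pvLower_getD_space (cs : List Char) (i : Nat) (h : i < cs.length)
    (hp : ((PySem.Chars.lower cs).drop i).take 4 = pvPatA) :
    PySem.Chars.lowerChar (cs.getD i ' ') = ' ' := by
  have h2 : (PySem.Chars.lower cs).drop i
      = pvPatA ++ ((PySem.Chars.lower cs).drop i).drop 4 := by
    rw [← hp]; exact (List.take_append_drop 4 _).symm
  have h3 : ((PySem.Chars.lower cs).drop i).head? = some ' ' := by rw [h2]; rfl
  rw [List.head?_drop] at h3
  simp only [PySem.Chars.lower, List.getElem?_map, List.getElem?_eq_getElem h,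
    Option.map_some, Option.some.injEq] at h3
  rw [List.getD, List.getElem?_eq_getElem h]
  simpa using h3

-- A's loop computes the common specification whenever its state matches pvStateAt.
lemma pvALoop_eq (cs : List Char) : ∀ (rest : List Char) (i : Nat) (d : Int) (q : Bool),
    rest = cs.drop i → pvStateAt cs i = (q, d) →
    pvALoop cs (PySem.Chars.lower cs) rest i d q = pvRender cs (pvFG cs i) := by
  intro rest
  induction rest with
  | nil =>
    intro i d q hrest _
    have h : ¬ i < cs.length := by
      have := congrArg List.length hrest
      simp [List.length_drop] at this
      omega
    rw [pvALoop, pvFG_stop cs i h]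
    rfl
  | cons c rs ih =>
    intro i d q hrest hs
    have hlen : i < cs.length := by
      have := congrArg List.length hrest
      simp [List.length_drop] at this
      omega
    have hc : cs.getD i ' ' = c := by
      have h1 : (cs.drop i).head? = some c := by rw [← hrest]; rfl
      rw [List.head?_drop] at h1
      rw [List.getD, List.getElem?_eq_getElem hlen]
      rw [List.getElem?_eq_getElem hlen] at h1
      simpa using h1
    have hrs : rs = cs.drop (i + 1) := by
      have h1 := congrArg List.tail hrest
      simpa [List.tail_drop] using h1
    have hstep := pvStateAt_succ cs i hlen q d hs
    rw [hc] at hstep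
    rw [pvALoop]
    split_ifs with b1 b2 b3 b4 b5 b6
    · -- quote toggle
      rw [pvFG_cont cs i hlen, ih (i + 1) d (!q) hrs (by rw [hstep, if_pos b1])]
      rintro ⟨hp, -⟩
      have := pvLower_getD_space cs i hlen hp
      rw [hc, b1.1] at this
      exact absurd this (by decide)
    · -- inside quote
      have hq : q = true := b2
      have hns : pvStateAt cs (i + 1) = (q, d) := by
        rw [hstep, if_neg b1, if_neg (by simp [hq]), if_neg (by simp [hq])]
      rw [pvFG_cont cs i hlen, ih (i + 1) d q hrs hns]
      rintro ⟨-, hst⟩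
      rw [hs] at hst
      simp [hq] at hst
    · -- open paren
      have hq : q = false := by simpa using b2
      have hns : pvStateAt cs (i + 1) = (q, d + 1) := by
        rw [hstep, if_neg b1, if_pos ⟨hq, b3⟩]
      rw [pvFG_cont cs i hlen, ih (i + 1) (d + 1) q hrs hns]
      rintro ⟨hp, -⟩
      have := pvLower_getD_space cs i hlen hp
      rw [hc, b3] at this
      exact absurd this (by decide)
    · -- close paren at positive depth
      have hq : q = false := by simpa using b2
      have hns : pvStateAt cs (i + 1) = (q, d - 1) := by
        rw [hstep, if_neg b1,
          if_neg (by rintro ⟨-, hcc⟩; rw [b4.1] at hcc; exact absurd hcc (by decide)),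
          if_pos ⟨hq, b4.1, b4.2⟩]
      rw [pvFG_cont cs i hlen, ih (i + 1) (d - 1) q hrs hns]
      rintro ⟨hp, -⟩
      have := pvLower_getD_space cs i hlen hp
      rw [hc, b4.1] at this
      exact absurd this (by decide)
    · -- depth not zero
      have hns : pvStateAt cs (i + 1) = (q, d) := by
        rw [hstep, if_neg b1, if_neg (by rintro ⟨-, hcc⟩; exact b3 hcc),
          if_neg (by rintro ⟨-, hcc, hd⟩; exact b4 ⟨hcc, hd⟩)]
      rw [pvFG_cont cs i hlen, ih (i + 1) d q hrs hns]
      rintro ⟨-, hst⟩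
      rw [hs] at hst
      have : d = 0 := by simpa using congrArg Prod.snd hst
      exact b5 this
    · -- " as " not at this index
      have hns : pvStateAt cs (i + 1) = (q, d) := by
        rw [hstep, if_neg b1, if_neg (by rintro ⟨-, hcc⟩; exact b3 hcc),
          if_neg (by rintro ⟨-, hcc, hd⟩; exact b4 ⟨hcc, hd⟩)]
      rw [pvFG_cont cs i hlen, ih (i + 1) d q hrs hns]
      rintro ⟨hp, -⟩
      exact b6 hp
    · -- found: return the split
      have hq : q = false := by simpa using b2
      have hd : d = 0 := by simpa using b5
      rw [pvFG_found cs i hlen ⟨not_not.mp b6, by rw [hs, hq, hd]⟩]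
      rfl

lemma pvPrefix_iff_take (l : List Char) : pvPatA <+: l ↔ l.take 4 = pvPatA := by
  rw [List.prefix_iff_eq_take]
  exact ⟨fun h => h.symm, fun h => h.symm⟩

lemma pvNoMatch_from (cs : List Char) (start : Nat)
    (hno : ¬ pvPatB <:+: (PySem.Chars.lower cs).drop start) :
    ∀ i, start ≤ i → ¬ pvPatA <+: (PySem.Chars.lower cs).drop i := by
  intro i hi hp
  apply hno
  have hdrop : (PySem.Chars.lower cs).drop i
      = ((PySem.Chars.lower cs).drop start).drop (i - start) := by
    rw [List.drop_drop]; congr 1; omega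
  rw [hdrop] at hp
  exact hp.isInfix.trans (List.drop_suffix _ _).isInfix

lemma pvFG_none (n : Nat) : ∀ (cs : List Char) (start : Nat),
    cs.length - start ≤ n →
    (∀ i, start ≤ i → ¬ pvPatA <+: (PySem.Chars.lower cs).drop i) →
    pvFG cs start = none := by
  induction n with
  | zero =>
    intro cs start hn _
    exact pvFG_stop cs start (by omega)
  | succ m ih =>
    intro cs start hn hno
    by_cases h : start < cs.length
    · rw [pvFG_cont cs start h
        (by rintro ⟨hp, -⟩; exact hno start le_rfl ((pvPrefix_iff_take _).mpr hp))]
      exact ih cs (start + 1) (by omega) (fun i hi => hno i (by omega))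
    · exact pvFG_stop cs start h

lemma pvFG_skip (k : Nat) : ∀ (cs : List Char) (start i : Nat),
    start ≤ i → i - start ≤ k → i ≤ cs.length →
    (∀ j, start ≤ j → j < i → ¬ pvPatA <+: (PySem.Chars.lower cs).drop j) →
    pvFG cs start = pvFG cs i := by
  induction k with
  | zero =>
    intro cs start i h1 h2 _ _
    have : start = i := by omega
    rw [this]
  | succ m ih =>
    intro cs start i h1 h2 h3 hno
    by_cases he : start = i
    · rw [he]
    · have hlt : start < i := by omega
      rw [pvFG_cont cs start (by omega)
        (by rintro ⟨hp, -⟩; exact hno start le_rfl hlt ((pvPrefix_iff_take _).mpr hp))]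
      exact ih cs (start + 1) i (by omega) (by omega) h3 (fun j hj1 hj2 => hno j (by omega) hj2)

-- B's loop computes the common specification given enough fuel.
lemma pvBLoop_eq (fuel : Nat) : ∀ (cs : List Char) (start : Nat),
    cs.length + 1 - start ≤ fuel →
    pvBLoop cs (PySem.Chars.lower cs) fuel start = pvRender cs (pvFG cs start) := by
  induction fuel with
  | zero =>
    intro cs start hn
    rw [pvBLoop, pvFG_stop cs start (by omega)]
    rfl
  | succ m ih =>
    intro cs start hn
    rw [pvBLoop]
    by_cases hf : PySem.Chars.findFrom (PySem.Chars.lower cs) pvPatB (start : Int) none = -1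
    · rw [if_pos hf]
      by_cases hsl : start ≤ cs.length
      · have hno : ¬ pvPatB <:+: (PySem.Chars.lower cs).drop start :=
          (PySem.Chars.findFrom_natCast_eq_neg_one_iff (PySem.Chars.lower cs) pvPatB start
            (by rw [pvLower_length]; exact hsl)).mp hf
        rw [pvFG_none cs.length cs start (by omega) (pvNoMatch_from cs start hno)]
        rfl
      · rw [pvFG_stop cs start (by omega)]
        rfl
    · rw [if_neg hf]
      have hsl : start ≤ (PySem.Chars.lower cs).length :=
        pvFindFrom_start_le (PySem.Chars.lower cs) pvPatB start hf
      obtain ⟨hge, hpre, hbefore⟩ :=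
        PySem.Chars.findFrom_natCast_spec (PySem.Chars.lower cs) pvPatB start hsl hf
      set i := (PySem.Chars.findFrom (PySem.Chars.lower cs) pvPatB (start : Int) none).toNat with hidef
      have hstarti : start ≤ i := by omega
      have hilt : i < cs.length := by
        by_contra hge2
        have : (PySem.Chars.lower cs).drop i = [] := by
          rw [List.drop_eq_nil_iff, pvLower_length]; omega
        rw [this] at hpre
        have := hpre.length_le
        simp [pvPatB] at this
      have hskip : pvFG cs start = pvFG cs i :=
        pvFG_skip (i - start) cs start i hstarti le_rfl (by omega)
          (fun j hj1 hj2 => hbefore j hj1 hj2)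
      dsimp only
      split_ifs with hok
      · rw [hskip, pvFG_found cs i hilt ⟨(pvPrefix_iff_take _).mp hpre,
          by exact Prod.ext hok.1 hok.2⟩]
        rfl
      · rw [hskip, pvFG_cont cs i hilt
          (by rintro ⟨-, hst⟩;
              exact hok ⟨by rw [show pvPrefixState none (cs.take i) false 0 = pvStateAt cs i from rfl, hst],
                         by rw [show pvPrefixState none (cs.take i) false 0 = pvStateAt cs i from rfl, hst]⟩)]
        exact ih cs (i + 1) (by omega)

theorem pv_main (arguments : String) :
    split_cast_arguments_py arguments = split_cast_arguments_py_alt arguments := by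
  unfold split_cast_arguments_py split_cast_arguments_py_alt
  rw [pvALoop_eq arguments.toList arguments.toList 0 0 false (by simp) rfl,
    pvBLoop_eq ((PySem.Chars.lower arguments.toList).length + 1) arguments.toList 0
      (by rw [pvLower_length]; omega)]

-- ===== VERDICT (by name: the statement is the Claim_ definition above) =====
theorem split_cast_arguments_py_spec : Claim_equal_split_cast_arguments_py := by
  intro arguments _
  unfold Spec_split_cast_arguments_py
  exact pv_main arguments
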